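-- pv_equiv track=rewrite | github.com/eedede/Five-in-a-Row | five_in_a_row/fields.py | find_5_equals
-- ===== SOURCE A (Python) =====
-- def find_5_equals( pattern, data):
--
-- 	count = 0
-- 	count_max = 0
-- 	m_store = 0
--
-- 	for m in range( len( data)):
-- 		if data[m] == pattern:
-- 			count +=1
-- 			if count >= 5:
-- 				count_max = count
-- 				m_store = m
-- 		else:
-- 			count = 0
--
-- 	return count_max, m_store
-- ===== SOURCE B (Python) =====
-- def find_5_equals(pattern, data):
--     n = len(data)
--     count_max = 0
--     m_store = 0
--     i = 0
--     while i < n: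
--         if data[i] != pattern:
--             i += 1
--             continue
--         j = i
--         while j < n and data[j] == pattern:
--             j += 1
--         run_len = j - i
--         if run_len >= 5:
--             count_max = run_len
--             m_store = j - 1
--         i = j
--     return count_max, m_store
-- ===== Notes on version B (the rewrite author's own statement) =====
-- stated objective: alternative
-- what changed: B scans run-by-run: it jumps over each maximal block of matching cells at once and records (length, end index) of each block of length >= 5, instead of A's per-element incremental counter with conditional updates at every step.
import Mathlib
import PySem

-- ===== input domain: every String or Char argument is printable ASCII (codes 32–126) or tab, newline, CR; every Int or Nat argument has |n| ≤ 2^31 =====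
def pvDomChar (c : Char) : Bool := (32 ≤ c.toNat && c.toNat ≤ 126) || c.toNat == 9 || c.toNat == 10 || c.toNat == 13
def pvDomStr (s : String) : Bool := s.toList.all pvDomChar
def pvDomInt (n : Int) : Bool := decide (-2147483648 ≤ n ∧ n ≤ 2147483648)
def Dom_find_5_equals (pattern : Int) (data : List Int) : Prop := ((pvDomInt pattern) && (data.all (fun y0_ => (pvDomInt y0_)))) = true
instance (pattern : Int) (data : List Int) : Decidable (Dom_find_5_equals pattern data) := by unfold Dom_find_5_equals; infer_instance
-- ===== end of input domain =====

-- B replaces A's per-element incremental counter by a run-by-run scan (alternative decomposition, same O(n) cost).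

-- ===== PORT A =====
-- A's for-loop over m in range(len(data)), carrying (count, count_max, m_store) and the index m.
def find_5_equals_loop (pattern : Int) : List Int → Int → Int × Int → Int → Int × Int
  | [], _, res, _ => res
  | x :: xs, count, res, m =>
    if x = pattern then
      let count' := count + 1
      find_5_equals_loop pattern xs count' (if count' ≥ 5 then (count', m) else res) (m + 1)
    else
      find_5_equals_loop pattern xs 0 res (m + 1)

def find_5_equals (pattern : Int) (data : List Int) : Int × Int :=
  find_5_equals_loop pattern data 0 (0, 0) 0

-- ===== PORT B =====
-- inner while: length of the maximal matching prefix
def runLen (pattern : Int) : List Int → Nat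
  | [] => 0
  | x :: xs => if x = pattern then 1 + runLen pattern xs else 0

-- outer while over i, jumping a whole run at once
def find_5_equals_go (pattern : Int) : List Int → Int → Int × Int → Int × Int
  | [], _, res => res
  | x :: xs, i, res =>
    if x = pattern then
      let L := 1 + runLen pattern xs
      let res' := if (L : Int) ≥ 5 then ((L : Int), i + (L : Int) - 1) else res
      find_5_equals_go pattern (xs.drop (L - 1)) (i + (L : Int)) res'
    else
      find_5_equals_go pattern xs (i + 1) res
termination_by xs => xs.length
decreasing_by
  · simp [List.length_drop]
  · simp

def find_5_equals_alt (pattern : Int) (data : List Int) : Int × Int :=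
  find_5_equals_go pattern data 0 (0, 0)

-- ===== PRECONDITION & SPEC =====
def Spec_find_5_equals (pattern : Int) (data : List Int) (out : Int × Int) : Prop := out = find_5_equals_alt pattern data
instance (pattern : Int) (data : List Int) (out : Int × Int) : Decidable (Spec_find_5_equals pattern data out) := by unfold Spec_find_5_equals; infer_instance

-- ===== CLAIM (what is proved, stated in full; the proofs are below) =====
def Claim_equal_find_5_equals : Prop := ∀ (pattern : Int) (data : List Int), Dom_find_5_equals pattern data → Spec_find_5_equals pattern data (find_5_equals pattern data)

-- ===== LEMMAS AND PROOFS =====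

-- Running A's loop across the maximal matching prefix of ys: count grows by runLen,
-- and the stored result is overwritten by the final in-run update iff count + runLen ≥ 5 with a nonempty run.
theorem loop_run (pattern : Int) (ys : List Int) (c : Int) (res : Int × Int) (i : Int) :
    find_5_equals_loop pattern ys c res i =
      find_5_equals_loop pattern (ys.drop (runLen pattern ys)) (c + (runLen pattern ys : Int))
        (if 0 < runLen pattern ys ∧ c + (runLen pattern ys : Int) ≥ 5
          then (c + (runLen pattern ys : Int), i + (runLen pattern ys : Int) - 1) else res)
        (i + (runLen pattern ys : Int)) := by
  induction ys generalizing c res i with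
  | nil => simp [runLen]
  | cons y ys ih =>
    by_cases hy : y = pattern
    · have hL : runLen pattern (y :: ys) = runLen pattern ys + 1 := by
        simp [runLen, hy, Nat.add_comm]
      rw [hL]
      simp only [find_5_equals_loop, if_pos hy]
      rw [ih (c + 1) _ (i + 1), List.drop_succ_cons]
      have harg1 : c + 1 + (runLen pattern ys : Int) = c + ((runLen pattern ys + 1 : Nat) : Int) := by
        push_cast; ring
      have harg3 : i + 1 + (runLen pattern ys : Int) = i + ((runLen pattern ys + 1 : Nat) : Int) := by
        push_cast; ring
      have hres : (if 0 < runLen pattern ys ∧ c + 1 + (runLen pattern ys : Int) ≥ 5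
            then (c + 1 + (runLen pattern ys : Int), i + 1 + (runLen pattern ys : Int) - 1)
            else (if c + 1 ≥ 5 then ((c + 1 : Int), i) else res))
          = (if 0 < runLen pattern ys + 1 ∧ c + ((runLen pattern ys + 1 : Nat) : Int) ≥ 5
            then (c + ((runLen pattern ys + 1 : Nat) : Int), i + ((runLen pattern ys + 1 : Nat) : Int) - 1)
            else res) := by
        split_ifs with h1 h2 h3 h4 h5 <;> push_cast at * <;>
          first
            | rfl
            | (refine Prod.ext ?_ ?_ <;> simp <;> omega)
      rw [hres, harg1, harg3]
    · simp [runLen, hy]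

-- after dropping the maximal matching prefix, the head (if any) does not match
theorem dropRun_head (pattern : Int) (ys : List Int) :
    ∀ z ∈ (ys.drop (runLen pattern ys)).head?, z ≠ pattern := by
  induction ys with
  | nil => simp
  | cons y ys ih =>
    by_cases hy : y = pattern
    · have hL : runLen pattern (y :: ys) = runLen pattern ys + 1 := by
        simp [runLen, hy, Nat.add_comm]
      rw [hL, List.drop_succ_cons]
      exact ih
    · simp [runLen, hy]

theorem go_eq_loop (pattern : Int) (xs : List Int) (i : Int) (res : Int × Int) :
    find_5_equals_loop pattern xs 0 res i = find_5_equals_go pattern xs i res := by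
  induction hn : xs.length using Nat.strong_induction_on generalizing xs i res with
  | _ n ih =>
  cases xs with
  | nil => simp [find_5_equals_loop, find_5_equals_go]
  | cons x xs =>
    by_cases hx : x = pattern
    · rw [find_5_equals_go]
      simp only [if_pos hx]
      have hrun := loop_run pattern (x :: xs) 0 res i
      have hL : runLen pattern (x :: xs) = 1 + runLen pattern xs := by
        simp [runLen, if_pos hx]
      rw [hrun, hL]
      have hdrop : (x :: xs).drop (1 + runLen pattern xs) = xs.drop (1 + runLen pattern xs - 1) := by
        have : 1 + runLen pattern xs = (runLen pattern xs) + 1 := by omega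
        simp [this]
      rw [hdrop]
      have hcond : (0 < 1 + runLen pattern xs ∧ (0 : Int) + ((1 + runLen pattern xs : Nat) : Int) ≥ 5)
          ↔ (((1 + runLen pattern xs : Nat) : Int) ≥ 5) := by push_cast; omega
      have hres : (if 0 < 1 + runLen pattern xs ∧ (0 : Int) + ((1 + runLen pattern xs : Nat) : Int) ≥ 5
          then ((0 : Int) + ((1 + runLen pattern xs : Nat) : Int), i + ((1 + runLen pattern xs : Nat) : Int) - 1) else res)
          = (if ((1 + runLen pattern xs : Nat) : Int) ≥ 5
          then (((1 + runLen pattern xs : Nat) : Int), i + ((1 + runLen pattern xs : Nat) : Int) - 1) else res) := by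
        by_cases h : ((1 + runLen pattern xs : Nat) : Int) ≥ 5
        · rw [if_pos (hcond.mpr h), if_pos h]; ring_nf
        · rw [if_neg (fun hc => h (hcond.mp hc)), if_neg h]
      rw [hres]
      -- now both sides continue on rest := xs.drop (runLen pattern xs), with count 1+runLen vs 0
      set rest := xs.drop (1 + runLen pattern xs - 1) with hrest
      set res' := (if ((1 + runLen pattern xs : Nat) : Int) ≥ 5
          then (((1 + runLen pattern xs : Nat) : Int), i + ((1 + runLen pattern xs : Nat) : Int) - 1) else res) with hres'
      have hrest_head : ∀ z ∈ rest.head?, z ≠ pattern := by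
        have := dropRun_head pattern (x :: xs)
        rw [hL, hdrop] at this
        exact this
      have hlen_rest : rest.length ≤ xs.length := by
        rw [hrest, List.length_drop]; omega
      cases hrc : rest with
      | nil => simp [find_5_equals_loop, find_5_equals_go]
      | cons z zs =>
        have hz : z ≠ pattern := hrest_head z (by simp [hrc])
        rw [find_5_equals_loop, find_5_equals_go]
        rw [if_neg hz, if_neg hz]
        have hlen : zs.length < n := by
          have h1 : rest.length = zs.length + 1 := by simp [hrc]
          have hn' : xs.length + 1 = n := by simpa using hn
          omega
        exact ih zs.length hlen zs _ _ rfl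
    · rw [find_5_equals_loop, find_5_equals_go, if_neg hx, if_neg hx]
      have hlen : xs.length < n := by
        have hn' : xs.length + 1 = n := by simpa using hn
        omega
      exact ih xs.length hlen xs _ _ rfl

-- ===== VERDICT (by name: the statement is the Claim_ definition above) =====
theorem find_5_equals_spec : Claim_equal_find_5_equals := by
  intro pattern data _
  unfold Spec_find_5_equals find_5_equals find_5_equals_alt
  exact go_eq_loop pattern data 0 (0, 0)
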